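-- pv_equiv track=rewrite | github.com/Sh-IT0311/Coding-Test | programmers/level4/자동완성.py | solution
-- ===== SOURCE A (Python) =====
-- from collections import defaultdict
--
-- def solution(words):
--     answer = 0
--
--     data = defaultdict(list)
--     for word in words:
--         data[word[0]].append(word)
--
--     while True:
--         keys = list()
--         deletes = list()
--
--         for key, values in data.items():
--             if len(values) != 1:
--                 keys.append(key)
--             else:
--                 deletes.append(key)
--
--         for delete in deletes:
--             data.pop(delete)
--             answer += len(delete)
--
--         if len(keys) == 0:
--             break
--
--         for key in keys:
--             values = data.pop(key)
--             num = len(key) + 1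
--             for value in values:
--                 data[value[:num]].append(value)
--
--     return answer
-- ===== SOURCE B (Python) =====
-- def solution(words):
--     # Per-word closed form: a word is typed up to the first length at which its
--     # prefix is unique, i.e. min(len(w), 1 + longest common prefix with any other word).
--     def lcp(a, b):
--         n = 0
--         for x, y in zip(a, b):
--             if x != y:
--                 break
--             n += 1
--         return n
--     total = 0
--     for i, w in enumerate(words):
--         m = 0
--         for j, v in enumerate(words):
--             if j != i:
--                 m = max(m, lcp(w, v))
--         total += min(len(w), m + 1)
--     return total
-- ===== Notes on version B (the rewrite author's own statement) =====
-- stated objective: alternative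
-- what changed: A repeatedly regroups the surviving words in a dict keyed by ever-longer prefixes until every group is a singleton; B computes each word's cost directly by the closed form min(len(w), 1 + max common prefix with any other word) and sums, with no dict and no iterative regrouping.
import Mathlib
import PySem

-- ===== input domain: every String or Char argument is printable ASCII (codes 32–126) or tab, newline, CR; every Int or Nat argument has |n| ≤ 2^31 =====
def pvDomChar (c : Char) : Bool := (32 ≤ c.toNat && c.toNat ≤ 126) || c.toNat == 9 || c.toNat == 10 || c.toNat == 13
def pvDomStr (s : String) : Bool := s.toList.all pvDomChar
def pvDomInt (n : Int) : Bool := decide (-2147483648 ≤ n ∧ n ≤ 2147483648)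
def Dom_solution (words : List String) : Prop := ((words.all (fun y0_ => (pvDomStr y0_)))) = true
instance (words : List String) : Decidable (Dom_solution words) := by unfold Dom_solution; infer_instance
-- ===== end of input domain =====

-- B replaces A's iterative prefix-regrouping dict loop by the per-word closed form
-- min(len(w), 1 + max common prefix length with any other word), summed; return value only.

-- ===== PORT A =====
-- word[0] as a 1-character string; Python raises IndexError on "" (excluded by Pre_), "" here
def pyWordKey (w : String) : String :=
  match PySem.Str.pyGet? w 0 with
  | some c => String.ofList [c]
  | none => ""

-- values = data.pop(key); for value in values: data[value[:len(key)+1]].append(value)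
def aRedistribute (d : PySem.Dict String (List String)) (k : String) :
    PySem.Dict String (List String) :=
  let values := d.getD k []
  let d' := d.erase k
  let num := PySem.Str.len k + 1
  values.foldl (fun d v => d.modify (PySem.Str.slice v none (some num)) [] (· ++ [v])) d'

-- the 'while True' loop; one iteration per fuel unit (fuel 0 = the excluded non-terminating case)
def solLoop : Nat → PySem.Dict String (List String) → Int → Int
  | 0, _, answer => answer
  | fuel+1, data, answer =>
    let kd := data.items.foldl (fun (kd : List String × List String) p =>
        if p.2.length ≠ 1 then (kd.1 ++ [p.1], kd.2) else (kd.1, kd.2 ++ [p.1])) ([], [])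
    let st := kd.2.foldl (fun (st : PySem.Dict String (List String) × Int) k =>
        (st.1.erase k, st.2 + PySem.Str.len k)) (data, answer)
    if kd.1.length = 0 then st.2
    else solLoop fuel (kd.1.foldl aRedistribute st.1) st.2

def solution (words : List String) : Int :=
  let data := words.foldl (fun d w => d.modify (pyWordKey w) [] (· ++ [w])) PySem.Dict.empty
  solLoop (words.foldl (fun n w => n + (PySem.Str.len w).toNat) 0 + 2) data 0

-- ===== PORT B =====
-- Source B's lcp: count matching leading characters, stop at the first mismatch
def lcpB : List Char → List Char → Nat
  | x :: xs, y :: ys => if x = y then lcpB xs ys + 1 else 0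
  | _, _ => 0

def solution_alt (words : List String) : Int :=
  (PySem.List.enumerate words).foldl (fun total iw =>
    let m := (PySem.List.enumerate words).foldl (fun m jv =>
        if jv.1 ≠ iw.1 then max m (lcpB iw.2.toList jv.2.toList) else m) 0
    total + min (PySem.Str.len iw.2) ((m : Int) + 1)) 0

-- ===== PRECONDITION & SPEC =====
-- Pre_ excludes inputs with an empty word (A raises IndexError) and with duplicate
-- words (A's regrouping loop never terminates); it is exactly A's returning domain.
def Pre_solution (words : List String) : Prop := words.Nodup ∧ ∀ w ∈ words, w ≠ ""
instance (words : List String) : Decidable (Pre_solution words) := by unfold Pre_solution; infer_instance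
def pvWitness_solution : List String := (["go", "gone", "guild"])

def Spec_solution (words : List String) (out : Int) : Prop := out = solution_alt words
instance (words : List String) (out : Int) : Decidable (Spec_solution words out) := by unfold Spec_solution; infer_instance

-- ===== CLAIM (what is proved, stated in full; the proofs are below) =====
def Claim_equal_solution : Prop := ∀ (words : List String), Dom_solution words → Pre_solution words → Spec_solution words (solution words)

-- ===== LEMMAS AND PROOFS =====
theorem lcpB_le_left : ∀ (a b : List Char), lcpB a b ≤ a.length
  | [], _ => by simp [lcpB]
  | _ :: _, [] => by simp [lcpB]
  | x :: xs, y :: ys => by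
    simp only [lcpB, List.length_cons]
    split_ifs
    · exact Nat.succ_le_succ (lcpB_le_left xs ys)
    · exact Nat.zero_le _

theorem lcpB_comm : ∀ (a b : List Char), lcpB a b = lcpB b a
  | [], [] => rfl
  | [], _ :: _ => rfl
  | _ :: _, [] => rfl
  | x :: xs, y :: ys => by
    simp only [lcpB]
    rcases eq_or_ne x y with h | h
    · subst h; simp [lcpB_comm xs ys]
    · simp [h, Ne.symm h]

theorem lcpB_self : ∀ (a : List Char), lcpB a a = a.length
  | [] => rfl
  | x :: xs => by simp [lcpB, lcpB_self xs]

theorem take_eq_take_iff_lcp : ∀ (a b : List Char) (r : Nat), a ≠ b →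
    (a.take r = b.take r ↔ r ≤ lcpB a b)
  | a, b, 0, _ => by simp
  | [], b, r + 1, hne => by
    cases b with
    | nil => exact absurd rfl hne
    | cons y ys => simp [lcpB]
  | x :: xs, [], r + 1, hne => by simp [lcpB]
  | x :: xs, y :: ys, r + 1, hne => by
    simp only [List.take_succ_cons, List.cons.injEq, lcpB]
    rcases eq_or_ne x y with h | h
    · subst h
      have hxs : xs ≠ ys := by intro h; exact hne (by rw [h])
      simp [take_eq_take_iff_lcp xs ys r hxs]
    · simp [h]

def prefS (r : Nat) (w : String) : String := String.ofList (w.toList.take r)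

theorem toList_prefS (r : Nat) (w : String) : (prefS r w).toList = w.toList.take r := by
  simp [prefS]

theorem prefS_eq_iff {v w : String} (hne : v ≠ w) (r : Nat) :
    (prefS r v = prefS r w ↔ r ≤ lcpB v.toList w.toList) := by
  rw [← String.toList_inj, toList_prefS, toList_prefS]
  exact take_eq_take_iff_lcp _ _ r (fun h => hne (String.toList_inj.mp h))

theorem prefS_prefS {r s : Nat} (h : r ≤ s) (w : String) : prefS r (prefS s w) = prefS r w := by
  rw [← String.toList_inj, toList_prefS, toList_prefS, toList_prefS, List.take_take,
    Nat.min_eq_left h]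

theorem len_prefS (r : Nat) (w : String) :
    PySem.Str.len (prefS r w) = ((min r w.toList.length : Nat) : Int) := by
  rw [PySem.Str.len_eq, toList_prefS, List.length_take]

theorem slice_prefS_step {r : Nat} {v k : String} (h : prefS r v = k) :
    PySem.Str.slice v none (some (PySem.Str.len k + 1)) = prefS (r + 1) v := by
  subst h
  rw [len_prefS]
  rw [← String.toList_inj, PySem.Str.toList_slice, toList_prefS]
  have : ((min r v.toList.length : Nat) : Int) + 1 = ((min r v.toList.length + 1 : Nat) : Int) := by
    push_cast; ring
  rw [this]
  show PySem.List.slice v.toList none (some _) = _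
  rw [PySem.List.slice_to_natCast]
  rcases Nat.le_total v.toList.length r with h | h
  · rw [Nat.min_eq_right h, List.take_of_length_le (by omega),
      List.take_of_length_le (by omega)]
  · rw [Nat.min_eq_left h]

theorem find?_filter_of_imp {α : Type} (l : List α) (p q : α → Bool)
    (h : ∀ x, p x = true → q x = true) : (l.filter q).find? p = l.find? p := by
  induction l with
  | nil => rfl
  | cons x xs ih =>
    by_cases hp : p x
    · rw [List.find?_cons_of_pos hp, List.filter_cons_of_pos (h x hp),
        List.find?_cons_of_pos hp]
    · by_cases hq : q x
      · rw [List.filter_cons_of_pos hq, List.find?_cons_of_neg hp,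
          List.find?_cons_of_neg hp, ih]
      · rw [List.filter_cons_of_neg hq, List.find?_cons_of_neg hp, ih]

theorem getD_erase {ν : Type} (d : PySem.Dict String ν) (k k' : String) (dflt : ν) :
    (d.erase k).getD k' dflt = if k' = k then dflt else d.getD k' dflt := by
  rcases eq_or_ne k' k with h | h
  · subst h
    simp only [PySem.Dict.erase, PySem.Dict.getD, PySem.Dict.get?]
    have : (d.items.filter (fun p => !p.1 == k')).find? (fun p => p.1 == k') = none := by
      rw [List.find?_eq_none]
      intro p hp
      simp only [List.mem_filter] at hp
      simpa using hp.2
    simp [this]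
  · simp only [PySem.Dict.erase, PySem.Dict.getD, PySem.Dict.get?, if_neg h]
    rw [find?_filter_of_imp]
    intro p hp
    simp only [beq_iff_eq] at hp ⊢
    rw [hp]
    simpa using h

theorem keys_erase {ν : Type} (d : PySem.Dict String ν) (k : String) :
    (d.erase k).keys = d.keys.filter (fun x => !(x == k)) := by
  simp only [PySem.Dict.erase, PySem.Dict.keys]
  rw [List.filter_map]
  rfl

theorem nodup_keys_erase {ν : Type} (d : PySem.Dict String ν) (k : String)
    (h : d.keys.Nodup) : (d.erase k).keys.Nodup := by
  rw [keys_erase]; exact h.filter _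

theorem getD_foldl_erase {ν : Type} (ds : List String) (d : PySem.Dict String ν)
    (k' : String) (dflt : ν) :
    ((ds.foldl (fun d k => d.erase k) d).getD k' dflt) =
      if k' ∈ ds then dflt else d.getD k' dflt := by
  induction ds generalizing d with
  | nil => simp
  | cons x xs ih =>
    simp only [List.foldl_cons, ih, getD_erase, List.mem_cons]
    by_cases h1 : k' ∈ xs
    · simp [h1]
    · by_cases h2 : k' = x <;> simp [h1, h2]

theorem keys_foldl_erase {ν : Type} (ds : List String) (d : PySem.Dict String ν) :
    (ds.foldl (fun d k => d.erase k) d).keys = d.keys.filter (fun x => decide (x ∉ ds)) := by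
  induction ds generalizing d with
  | nil => simp
  | cons x xs ih =>
    rw [List.foldl_cons, ih, keys_erase, List.filter_filter]
    apply List.filter_congr
    intro y _
    by_cases h1 : y = x <;> by_cases h2 : y ∈ xs <;> simp [h1, h2]

theorem kd_foldl (l : List (String × List String)) (ka kb : List String) :
    l.foldl (fun (kd : List String × List String) p =>
        if p.2.length ≠ 1 then (kd.1 ++ [p.1], kd.2) else (kd.1, kd.2 ++ [p.1])) (ka, kb) =
      (ka ++ (l.filter (fun p => decide (p.2.length ≠ 1))).map (·.1),
       kb ++ (l.filter (fun p => !decide (p.2.length ≠ 1))).map (·.1)) := by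
  induction l generalizing ka kb with
  | nil => simp
  | cons x xs ih =>
    rw [List.foldl_cons]
    by_cases h : x.2.length ≠ 1
    · rw [if_pos h, ih, List.filter_cons_of_pos (by simpa using h),
        List.filter_cons_of_neg (by simpa using h)]
      simp
    · rw [if_neg h, ih, List.filter_cons_of_neg (by simpa using h),
        List.filter_cons_of_pos (by simpa using h)]
      simp

theorem erase_sum_foldl (ds : List String) (d : PySem.Dict String (List String)) (a : Int) :
    ds.foldl (fun (st : PySem.Dict String (List String) × Int) k =>
        (st.1.erase k, st.2 + PySem.Str.len k)) (d, a) =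
      (ds.foldl (fun d k => d.erase k) d, a + (ds.map PySem.Str.len).sum) := by
  induction ds generalizing d a with
  | nil => simp
  | cons x xs ih =>
    rw [List.foldl_cons, List.foldl_cons, ih, List.map_cons, List.sum_cons, add_assoc]

theorem le_foldl_max_iff (l : List Nat) (a r : Nat) (hr : 1 ≤ r) :
    r ≤ l.foldl max a ↔ r ≤ a ∨ ∃ x ∈ l, r ≤ x := by
  induction l generalizing a with
  | nil => simp
  | cons x xs ih =>
    rw [List.foldl_cons, ih]
    constructor
    · rintro (h | h)
      · rcases le_max_iff.mp h with h2 | h2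
        · exact Or.inl h2
        · exact Or.inr ⟨x, List.mem_cons_self, h2⟩
      · exact h.elim fun y hy => Or.inr ⟨y, List.mem_cons_of_mem _ hy.1, hy.2⟩
    · rintro (h | ⟨y, hy, h2⟩)
      · exact Or.inl (le_trans h (le_max_left _ _))
      · rcases List.mem_cons.mp hy with rfl | hy2
        · exact Or.inl (le_trans h2 (le_max_right _ _))
        · exact Or.inr ⟨y, hy2, h2⟩

def mlcp (ws : List String) (w : String) : Nat :=
  ((ws.filter (fun v => decide (v ≠ w))).map (fun v => lcpB w.toList v.toList)).foldl max 0

def cwF (ws : List String) (w : String) : Int :=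
  min (PySem.Str.len w) ((mlcp ws w : Int) + 1)

def remW (ws : List String) (r : Nat) : List String :=
  ws.filter (fun w => decide (r ≤ mlcp ws w + 1))

def tailSum (ws : List String) (r : Nat) : Int := ((remW ws r).map (cwF ws)).sum

theorem foldl_if_max {α : Type} (l : List α) (p : α → Bool) (f : α → Nat) (m : Nat) :
    l.foldl (fun m x => if p x then max m (f x) else m) m =
      ((l.filter p).map f).foldl max m := by
  induction l generalizing m with
  | nil => rfl
  | cons x xs ih =>
    rw [List.foldl_cons]
    by_cases h : p x
    · rw [if_pos h, List.filter_cons_of_pos h, List.map_cons, List.foldl_cons, ih]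
    · rw [if_neg (by simpa using h), List.filter_cons_of_neg (by simpa using h), ih]

theorem map_snd_filter_snd {α β : Type} (l : List (α × β)) (p : β → Bool) :
    (l.filter (fun x => p x.2)).map (fun x => x.2) = (l.map (fun x => x.2)).filter p := by
  rw [List.filter_map]
  rfl

theorem mem_enumerate_iff {α : Type} (l : List α) (jv : Int × α) :
    jv ∈ PySem.List.enumerate l 0 ↔ ∃ n : Nat, ∃ h : n < l.length, jv = ((n : Int), l[n]) := by
  rw [List.mem_iff_getElem]
  constructor
  · rintro ⟨n, h, he⟩
    rw [PySem.List.length_enumerate] at h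
    refine ⟨n, h, ?_⟩
    rw [PySem.List.getElem_enumerate] at he
    · simpa using he.symm
  · rintro ⟨n, h, he⟩
    refine ⟨n, by rw [PySem.List.length_enumerate]; exact h, ?_⟩
    rw [PySem.List.getElem_enumerate]
    simpa using he.symm

theorem inner_fold_eq_mlcp (ws : List String) (hnd : ws.Nodup) (k : Nat)
    (hk : k < ws.length) :
    (PySem.List.enumerate ws).foldl (fun m jv =>
        if jv.1 ≠ ((k : Int)) then max m (lcpB (ws[k]).toList jv.2.toList) else m) 0 =
      mlcp ws ws[k] := by
  have hcongr : (PySem.List.enumerate ws 0).foldl (fun m jv =>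
      if jv.1 ≠ ((k : Int)) then max m (lcpB (ws[k]).toList jv.2.toList) else m) 0 =
      (PySem.List.enumerate ws 0).foldl (fun m jv =>
      if decide (jv.2 ≠ ws[k]) then max m (lcpB (ws[k]).toList jv.2.toList) else m) 0 := by
    apply PySem.List.foldl_congr_mem
    intro acc jv hjv
    rcases (mem_enumerate_iff ws jv).mp hjv with ⟨n, hn, rfl⟩
    have : ((n : Int) ≠ (k : Int)) ↔ (ws[n] ≠ ws[k]) := by
      constructor
      · intro h he
        exact h (by exact_mod_cast congrArg Nat.cast ((hnd.getElem_inj_iff).mp he))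
      · intro h he
        have hnk : n = k := by exact_mod_cast he
        subst hnk
        exact h rfl
    by_cases h : (n : Int) = (k : Int)
    · rw [if_neg (by simpa using h), if_neg (by simp [← this, h])]
    · rw [if_pos h, if_pos (by simpa using this.mp h)]
  show (PySem.List.enumerate ws 0).foldl _ 0 = _
  rw [hcongr, foldl_if_max]
  have h1 := map_snd_filter_snd (PySem.List.enumerate ws 0) (fun v => decide (v ≠ ws[k]))
  rw [PySem.List.map_snd_enumerate] at h1
  have hmap : ((PySem.List.enumerate ws 0).filter (fun jv => decide (jv.2 ≠ ws[k]))).map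
      (fun jv => lcpB (ws[k]).toList jv.2.toList) =
      ((ws.filter (fun v => decide (v ≠ ws[k]))).map (fun v => lcpB (ws[k]).toList v.toList)) := by
    rw [← h1, List.map_map]
    rfl
  rw [hmap, mlcp]

theorem alt_eq_sum (ws : List String) (hnd : ws.Nodup) :
    solution_alt ws = (ws.map (cwF ws)).sum := by
  unfold solution_alt
  rw [PySem.List.foldl_add, zero_add]
  congr 1
  apply List.ext_getElem
  · rw [List.length_map, PySem.List.length_enumerate, List.length_map]
  · intro k h1 h2
    rw [List.length_map, PySem.List.length_enumerate] at h1
    rw [List.getElem_map, List.getElem_map, PySem.List.getElem_enumerate]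
    simp only [zero_add]
    rw [inner_fold_eq_mlcp ws hnd k h1]
    rfl

theorem lcp_le_mlcp {ws : List String} {v w : String} (hv : v ∈ ws) (hne : v ≠ w) :
    lcpB w.toList v.toList ≤ mlcp ws w := by
  unfold mlcp
  have hmem : lcpB w.toList v.toList ∈
      ((ws.filter (fun v => decide (v ≠ w))).map (fun v => lcpB w.toList v.toList)) :=
    List.mem_map_of_mem (List.mem_filter.mpr ⟨hv, by simpa using hne⟩)
  exact (PySem.List.le_foldl_max _ _).2 _ hmem

theorem mlcp_ge_iff {ws : List String} (w : String) {r : Nat} (hr : 1 ≤ r) :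
    r ≤ mlcp ws w ↔ ∃ v ∈ ws, v ≠ w ∧ r ≤ lcpB w.toList v.toList := by
  unfold mlcp
  rw [le_foldl_max_iff _ _ _ hr]
  constructor
  · rintro (h | ⟨x, hx, h2⟩)
    · omega
    · rcases List.mem_map.mp hx with ⟨v, hv, rfl⟩
      rcases List.mem_filter.mp hv with ⟨hv1, hv2⟩
      exact ⟨v, hv1, by simpa using hv2, h2⟩
  · rintro ⟨v, hv, hne, h2⟩
    exact Or.inr ⟨_, List.mem_map_of_mem (List.mem_filter.mpr ⟨hv, by simpa using hne⟩), h2⟩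

theorem mem_remW {ws : List String} {w : String} {r : Nat} :
    w ∈ remW ws r ↔ w ∈ ws ∧ r ≤ mlcp ws w + 1 := by
  simp [remW]

theorem remW_one (ws : List String) : remW ws 1 = ws := by
  unfold remW
  rw [List.filter_congr (q := fun _ => true) (fun w _ => by simp), List.filter_true]

theorem remW_succ (ws : List String) (r : Nat) :
    remW ws (r + 1) = (remW ws r).filter (fun w => decide (r + 1 ≤ mlcp ws w + 1)) := by
  unfold remW
  rw [List.filter_filter]
  apply List.filter_congr
  intro w _
  by_cases h : r + 1 ≤ mlcp ws w + 1 <;> simp [h] <;> omega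

theorem nodup_remW {ws : List String} (hnd : ws.Nodup) (r : Nat) : (remW ws r).Nodup :=
  hnd.filter _

-- a word sharing an r-prefix with another distinct word of ws survives past round r
theorem shares_mem_remW {ws : List String} {v w : String} (hv : v ∈ ws) (hw : w ∈ ws)
    (hne : w ≠ v) {r : Nat} (hr : 1 ≤ r) (hpref : prefS r w = prefS r v) :
    w ∈ remW ws (r + 1) := by
  rw [mem_remW]
  refine ⟨hw, ?_⟩
  have hlcp : r ≤ lcpB w.toList v.toList := (prefS_eq_iff hne r).mp hpref
  have h2 : lcpB w.toList v.toList ≤ mlcp ws w := lcp_le_mlcp hv (Ne.symm hne)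
  omega

theorem mem_keys_of_getD_ne {ν : Type} [DecidableEq ν] {d : PySem.Dict String ν} {k : String}
    {dflt : ν} (h : d.getD k dflt ≠ dflt) : k ∈ d.keys := by
  by_contra hk
  apply h
  have : d.items.find? (fun p => p.1 == k) = none := by
    rw [List.find?_eq_none]
    intro p hp
    simp only [beq_iff_eq]
    intro he
    exact hk (he ▸ List.mem_map_of_mem hp)
  simp [PySem.Dict.getD, PySem.Dict.get?, this]


theorem map_pair_filter_fst {α κ : Type} (l : List α) (g : α → κ × List α)
    (q : κ × List α → Bool) (hfst : True) :
    ((l.map g).filter q).map (fun p => p.1) = ((l.filter (fun x => q (g x))).map (fun x => (g x).1)) := by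
  rw [List.filter_map, List.map_map]
  rfl

theorem getD_foldl_modify_key (l : List String) (key : String → String)
    (d : PySem.Dict String (List String)) (c : String) :
    (l.foldl (fun d v => d.modify (key v) [] (· ++ [v])) d).getD c [] =
      d.getD c [] ++ (l.filter (fun v => key v == c)) := by
  induction l generalizing d with
  | nil => simp
  | cons x xs ih =>
    rw [List.foldl_cons, ih]
    by_cases h : key x = c
    · rw [List.filter_cons_of_pos (by simpa using h),
        PySem.Dict.getD_modify, if_pos h.symm]
      subst h
      simp
    · rw [List.filter_cons_of_neg (by simpa using h),
        PySem.Dict.getD_modify, if_neg (Ne.symm h)]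

theorem getD_aRedistribute {d : PySem.Dict String (List String)} {k : String} {r : Nat}
    (hkeys : ∀ v ∈ d.getD k [], prefS r v = k) (k' : String) :
    (aRedistribute d k).getD k' [] =
      (d.erase k).getD k' [] ++ (d.getD k []).filter (fun v => prefS (r + 1) v == k') := by
  unfold aRedistribute
  simp only []
  rw [PySem.List.foldl_congr_mem _ _
    (fun d v => d.modify (prefS (r + 1) v) [] (· ++ [v])) _
    (fun acc v hv => by rw [slice_prefS_step (hkeys v hv)])]
  exact getD_foldl_modify_key _ _ _ _

theorem keys_aRedistribute (d : PySem.Dict String (List String)) (k : String) {r : Nat}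
    (hkeys : ∀ v ∈ d.getD k [], prefS r v = k) :
    (aRedistribute d k).keys =
      PySem.Set.update (d.erase k).keys ((d.getD k []).map (fun v => prefS (r + 1) v)) := by
  unfold aRedistribute
  simp only []
  rw [PySem.List.foldl_congr_mem _ _
    (fun d v => d.modify (prefS (r + 1) v) [] (· ++ [v])) _
    (fun acc v hv => by rw [slice_prefS_step (hkeys v hv)])]
  exact PySem.Dict.keys_foldl_modify_key _ _ _ (fun _ v old => old ++ [v]) _

theorem nodup_keys_aRedistribute (d : PySem.Dict String (List String)) (k : String)
    (h : d.keys.Nodup) : (aRedistribute d k).keys.Nodup := by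
  unfold aRedistribute
  simp only []
  exact PySem.Dict.nodup_keys_foldl_modify_key _ _ _ (fun _ v old => old ++ [v]) _
    (nodup_keys_erase _ _ h)

theorem exists_second {l : List String} (hnd : l.Nodup) (hlen : 2 ≤ l.length)
    {v : String} (hv : v ∈ l) : ∃ u ∈ l, u ≠ v := by
  match l, hlen with
  | a :: b :: t, _ =>
    have hab : a ≠ b := by simp [List.nodup_cons] at hnd; tauto
    rcases eq_or_ne v a with rfl | h
    · exact ⟨b, by simp, Ne.symm hab⟩
    · exact ⟨a, by simp, Ne.symm h⟩

theorem redist_fold (ws : List String) (hnd : ws.Nodup) (r : Nat) (hr : 1 ≤ r) :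
    ∀ (ks : List String) (d : PySem.Dict String (List String)),
    ks.Nodup →
    (∀ k ∈ ks, 2 ≤ ((remW ws r).filter (fun w => prefS r w == k)).length) →
    (∀ k', d.getD k' [] =
       if k' ∈ ks then (remW ws r).filter (fun w => prefS r w == k')
       else (remW ws (r+1)).filter
         (fun w => decide (prefS r w ∉ ks) && (prefS (r+1) w == k'))) →
    d.keys.Nodup →
    (∀ k ∈ d.keys, d.getD k [] ≠ []) →
    (∀ k', (ks.foldl aRedistribute d).getD k' [] =
        (remW ws (r+1)).filter (fun w => prefS (r+1) w == k'))
    ∧ (ks.foldl aRedistribute d).keys.Nodup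
    ∧ (∀ k ∈ (ks.foldl aRedistribute d).keys, (ks.foldl aRedistribute d).getD k [] ≠ [])
  | [], d, _, _, hd, hnodup, hne3 => by
    refine ⟨fun k' => ?_, hnodup, hne3⟩
    rw [List.foldl_nil, hd k', if_neg (List.not_mem_nil)]
    apply List.filter_congr
    intro w _
    simp
  | k :: ks', d, hknd, hmulti, hd, hnodup, hne3 => by
    have hkmem : k ∈ k :: ks' := List.mem_cons_self
    have hknotin : k ∉ ks' := (List.nodup_cons.mp hknd).1
    have hks'nd : ks'.Nodup := (List.nodup_cons.mp hknd).2
    set Rr := remW ws r with hRr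
    set R1 := remW ws (r+1) with hR1
    have hG : d.getD k [] = Rr.filter (fun w => prefS r w == k) := by
      rw [hd k, if_pos hkmem]
    set G := Rr.filter (fun w => prefS r w == k) with hGdef
    have hGpref : ∀ v ∈ G, prefS r v = k := fun v hv => by
      simpa using (List.mem_filter.mp hv).2
    have hGpref' : ∀ v ∈ d.getD k [], prefS r v = k := by rw [hG]; exact hGpref
    have hGsub : ∀ v ∈ G, v ∈ ws := fun v hv =>
      (mem_remW.mp (List.mem_filter.mp hv).1).1
    have hGnd : G.Nodup := (nodup_remW hnd r).filter _
    have hGlen : 2 ≤ G.length := hmulti k hkmem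
    have hGmem1 : ∀ v ∈ G, v ∈ R1 := by
      intro v hv
      rcases exists_second hGnd hGlen hv with ⟨u, hu, hune⟩
      exact shares_mem_remW (hGsub u hu) (hGsub v hv) (Ne.symm hune) hr
        (by rw [hGpref v hv, hGpref u hu])
    have hGne : G ≠ [] := by
      intro h; rw [h] at hGlen; simp at hGlen
    have hkpref : prefS r k = k := by
      rcases List.exists_mem_of_ne_nil G hGne with ⟨w0, hw0⟩
      rw [← hGpref w0 hw0, prefS_prefS (le_refl r), hGpref w0 hw0]
    -- general: an (r+1)-prefix key determines the r-prefix
    have hdet : ∀ (w : String) (k'' : String), prefS (r+1) w = k'' →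
        prefS r w = prefS r k'' := by
      intro w k'' h
      rw [← h, prefS_prefS (Nat.le_succ r)]
    -- groups of ks' keys force prefS r k'' = k''
    have hkey_self : ∀ k'' ∈ ks', prefS r k'' = k'' := by
      intro k'' hk''
      have h2 : 2 ≤ (Rr.filter (fun w => prefS r w == k'')).length :=
        hmulti k'' (List.mem_cons_of_mem _ hk'')
      have hne' : (Rr.filter (fun w => prefS r w == k'')) ≠ [] := by
        intro h; rw [h] at h2; simp at h2
      rcases List.exists_mem_of_ne_nil _ hne' with ⟨w0, hw0⟩
      have := (List.mem_filter.mp hw0).2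
      simp only [beq_iff_eq] at this
      rw [← this, prefS_prefS (le_refl r), this]
    have hstep : ∀ k', (aRedistribute d k).getD k' [] =
        if k' ∈ ks' then Rr.filter (fun w => prefS r w == k')
        else R1.filter (fun w => decide (prefS r w ∉ ks') && (prefS (r+1) w == k')) := by
      intro k'
      rw [getD_aRedistribute hGpref' k', getD_erase, hG]
      by_cases hk' : k' ∈ ks'
      · -- unprocessed group untouched
        have hk'k : k' ≠ k := fun h => hknotin (h ▸ hk')
        rw [if_pos hk', if_neg hk'k, hd k', if_pos (List.mem_cons_of_mem _ hk')]
        have hnil : G.filter (fun v => prefS (r + 1) v == k') = [] := by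
          rw [List.filter_eq_nil_iff]
          intro v hv hbeq
          simp only [beq_iff_eq] at hbeq
          have h1 : prefS r v = prefS r k' := hdet v k' hbeq
          rw [hGpref v hv, hkey_self k' hk'] at h1
          exact hk'k h1.symm
        rw [hnil, List.append_nil]
      · rw [if_neg hk']
        by_cases hex : ∃ v ∈ R1, prefS (r+1) v = k' ∧ prefS r v = k
        · rcases hex with ⟨v0, hv0, hv0k', hv0k⟩
          have hprefk' : prefS r k' = k := by rw [← hdet v0 k' hv0k', hv0k]
          -- the target filter reduces to the bare (r+1)-prefix condition
          have htgt : R1.filter (fun w => decide (prefS r w ∉ ks') && (prefS (r+1) w == k'))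
              = R1.filter (fun w => prefS (r+1) w == k') := by
            apply List.filter_congr
            intro w _
            by_cases hw : prefS (r+1) w = k'
            · have : prefS r w = k := by rw [hdet w k' hw, hprefk']
              have : prefS r w ∉ ks' := by rw [this]; exact hknotin
              simp [hw, this]
            · simp [hw]
          -- the erased-dict part is empty
          have hzero : (if k' = k then ([] : List String) else d.getD k' []) = [] := by
            by_cases hkk : k' = k
            · rw [if_pos hkk]
            · rw [if_neg hkk, hd k', if_neg (by simp [hkk, hk'])]
              rw [List.filter_eq_nil_iff]
              intro w hw hcond
              simp only [Bool.and_eq_true, decide_eq_true_eq, beq_iff_eq] at hcond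
              have : prefS r w = k := by rw [hdet w k' hcond.2, hprefk']
              exact hcond.1 (this ▸ List.mem_cons_self)
          -- the redistributed group is the full new group
          have hgrp : G.filter (fun v => prefS (r + 1) v == k')
              = R1.filter (fun w => prefS (r + 1) w == k') := by
            rw [hGdef, List.filter_filter, hR1, remW_succ, ← hRr, List.filter_filter]
            apply List.filter_congr
            intro w hw
            by_cases hpw : prefS (r+1) w = k'
            · have hwk : prefS r w = k := by rw [hdet w k' hpw, hprefk']
              have hwG : w ∈ G := List.mem_filter.mpr ⟨hw, by simpa using hwk⟩
              have hwR1 : w ∈ R1 := hGmem1 w hwG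
              have hm := (mem_remW.mp hwR1).2
              have ht : (prefS (r+1) w == k') = true := by simpa using hpw
              have h1 : (prefS r w == k) = true := by simpa using hwk
              have h2 : decide (r + 1 ≤ mlcp ws w + 1) = true := decide_eq_true hm
              rw [ht, Bool.true_and, Bool.true_and, h1, h2]
            · have hf : (prefS (r+1) w == k') = false := by simpa using hpw
              rw [hf, Bool.false_and, Bool.false_and]
          rw [hzero, List.nil_append, hgrp, htgt]
        · -- no word moves to key k'
          push_neg at hex
          have hnil : G.filter (fun v => prefS (r + 1) v == k') = [] := by
            rw [List.filter_eq_nil_iff]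
            intro v hv hbeq
            simp only [beq_iff_eq] at hbeq
            exact hex v (hGmem1 v hv) hbeq (hGpref v hv)
          rw [hnil, List.append_nil]
          by_cases hkk : k' = k
          · rw [if_pos hkk]
            symm
            rw [List.filter_eq_nil_iff]
            intro w hw hcond
            simp only [Bool.and_eq_true, decide_eq_true_eq, beq_iff_eq] at hcond
            have h2 : prefS (r+1) w = k := hkk ▸ hcond.2
            have h3 : prefS r w = k := by rw [hdet w k h2, hkpref]
            exact hex w hw (hkk ▸ hcond.2) h3
          · rw [if_neg hkk, hd k', if_neg (by simp [hkk, hk'])]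
            apply List.filter_congr
            intro w hw
            by_cases hpw : prefS (r+1) w = k'
            · have hwk : prefS r w ≠ k := fun h => hex w hw hpw h
              have ht : (prefS (r+1) w == k') = true := by simpa using hpw
              rw [ht, Bool.and_true, Bool.and_true]
              simp [List.mem_cons, hwk]
            · have hf : (prefS (r+1) w == k') = false := by simpa using hpw
              rw [hf, Bool.and_false, Bool.and_false]
    have hmain := redist_fold ws hnd r hr ks' (aRedistribute d k) hks'nd
      (fun k hk => hmulti k (List.mem_cons_of_mem _ hk)) hstep
      (nodup_keys_aRedistribute d k hnodup) ?hne3'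
    · rw [List.foldl_cons]
      exact hmain
    case hne3' =>
      intro k'' hk''
      rw [keys_aRedistribute d k hGpref'] at hk''
      rw [getD_aRedistribute hGpref' k'']
      rcases (PySem.Set.mem_update _ _ _).mp hk'' with hmem | hmem
      · rw [keys_erase] at hmem
        rcases List.mem_filter.mp hmem with ⟨hmem1, hmem2⟩
        have hkk : k'' ≠ k := by simpa using hmem2
        rw [getD_erase, if_neg hkk]
        intro hh
        exact hne3 k'' hmem1 (List.append_eq_nil_iff.mp hh).1
      · rcases List.mem_map.mp hmem with ⟨v, hv, rfl⟩
        intro hh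
        have hv2 : v ∈ (d.getD k []).filter (fun v' => prefS (r+1) v' == prefS (r+1) v) :=
          List.mem_filter.mpr ⟨hv, by simp⟩
        rw [(List.append_eq_nil_iff.mp hh).2] at hv2
        simp at hv2

def InvA (ws : List String) (r : Nat) (d : PySem.Dict String (List String)) : Prop :=
  d.keys.Nodup ∧
  (∀ k, d.getD k [] = (remW ws r).filter (fun w => prefS r w == k)) ∧
  (∀ k ∈ d.keys, d.getD k [] ≠ [])

theorem mem_keys_iff_of_inv {ws : List String} {r : Nat}
    {d : PySem.Dict String (List String)} (h : InvA ws r d) (k : String) :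
    k ∈ d.keys ↔ (remW ws r).filter (fun w => prefS r w == k) ≠ [] := by
  obtain ⟨h1, h2, h3⟩ := h
  constructor
  · intro hk
    rw [← h2 k]
    exact h3 k hk
  · intro hne
    apply mem_keys_of_getD_ne (dflt := ([] : List String))
    rw [h2 k]
    exact hne

theorem pyWordKey_eq_prefS {w : String} (hw : w ≠ "") : pyWordKey w = prefS 1 w := by
  unfold pyWordKey
  have : w.toList ≠ [] := fun h => hw (by
    have := congrArg String.ofList h
    simpa using this)
  rcases hl : w.toList with _ | ⟨c, cs⟩
  · exact absurd hl this
  · rw [show PySem.Str.pyGet? w 0 = PySem.Chars.pyGet? w.toList 0 from rfl, hl]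
    rw [show PySem.Chars.pyGet? (c :: cs) 0 = some c from by
      simp [PySem.Chars.pyGet?, PySem.List.pyGet?, PySem.List.pyIdx?]]
    rw [prefS, hl]
    rfl

theorem init_inv (ws : List String) (hnd : ws.Nodup) (hne : ∀ w ∈ ws, w ≠ "") :
    InvA ws 1 (ws.foldl (fun d w => d.modify (pyWordKey w) [] (· ++ [w])) PySem.Dict.empty) := by
  have hcong : ws.foldl (fun d w => d.modify (pyWordKey w) [] (· ++ [w])) PySem.Dict.empty =
      ws.foldl (fun d w => d.modify (prefS 1 w) [] (· ++ [w])) PySem.Dict.empty :=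
    PySem.List.foldl_congr_mem _ _ _ _ (fun acc w hw => by rw [pyWordKey_eq_prefS (hne w hw)])
  rw [hcong]
  refine ⟨?_, ?_, ?_⟩
  · exact PySem.Dict.nodup_keys_foldl_modify_key _ _ _ (fun _ v old => old ++ [v]) _ (by simp)
  · intro k
    rw [getD_foldl_modify_key, remW_one]
    simp
  · intro k hk
    rw [PySem.Dict.keys_foldl_modify_key _ _ _ (fun _ v old => old ++ [v])] at hk
    rcases (PySem.Set.mem_update _ _ _).mp hk with hmem | hmem
    · rw [PySem.Dict.keys_empty] at hmem
      exact absurd hmem List.not_mem_nil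
    · rcases List.mem_map.mp hmem with ⟨v, hv, rfl⟩
      rw [getD_foldl_modify_key]
      intro hh
      have hv2 : v ∈ ws.filter (fun w => prefS 1 w == prefS 1 v) :=
        List.mem_filter.mpr ⟨hv, by simp⟩
      rw [show PySem.Dict.empty.getD (prefS 1 v) ([] : List String) = [] from rfl] at hh
      rw [List.nil_append] at hh
      rw [hh] at hv2
      simp at hv2

theorem eq_singleton_of_unique {l : List String} {a : String} (hm : a ∈ l)
    (hu : ∀ b ∈ l, b = a) (hnd : l.Nodup) : l = [a] := by
  match l, hm with
  | [b], _ =>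
    have := hu b (by simp)
    simp [this]
  | b :: c :: t, _ =>
    have hb := hu b (by simp)
    have hc := hu c (by simp)
    rw [List.nodup_cons] at hnd
    exact absurd (by rw [hb, hc] : b = c) (fun h => hnd.1 (h ▸ List.mem_cons_self))

theorem deletes_char {ws : List String} (hnd : ws.Nodup) {r : Nat} (hr : 1 ≤ r)
    {d : PySem.Dict String (List String)} (hinv : InvA ws r d) (k : String) :
    (k ∈ d.keys ∧ (d.getD k []).length = 1) ↔
      ∃ w ∈ remW ws r, mlcp ws w + 1 = r ∧ prefS r w = k := by
  obtain ⟨h1, h2, h3⟩ := hinv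
  constructor
  · rintro ⟨hk, hlen⟩
    rw [h2 k] at hlen
    rcases List.length_eq_one_iff.mp hlen with ⟨w, hw⟩
    have hwmem : w ∈ (remW ws r).filter (fun w => prefS r w == k) := by rw [hw]; simp
    rcases List.mem_filter.mp hwmem with ⟨hwr, hwp⟩
    simp only [beq_iff_eq] at hwp
    have hwws : w ∈ ws := (mem_remW.mp hwr).1
    refine ⟨w, hwr, ?_, hwp⟩
    have hub : r ≤ mlcp ws w + 1 := (mem_remW.mp hwr).2
    by_contra hc
    have hge : r ≤ mlcp ws w := by omega
    rcases (mlcp_ge_iff w hr).mp hge with ⟨v, hvws, hvne, hlcp⟩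
    have hvr : v ∈ remW ws r := by
      rw [mem_remW]
      have := lcp_le_mlcp (ws := ws) (v := w) (w := v) hwws (Ne.symm hvne)
      rw [lcpB_comm] at this
      exact ⟨hvws, by omega⟩
    have hvpref : prefS r v = prefS r w := by
      rw [prefS_eq_iff hvne r, lcpB_comm]
      exact hlcp
    have hvmem : v ∈ (remW ws r).filter (fun w => prefS r w == k) :=
      List.mem_filter.mpr ⟨hvr, by simp [hvpref, hwp]⟩
    rw [hw] at hvmem
    simp at hvmem
    exact hvne (by rw [hvmem])
  · rintro ⟨w, hwr, hmr, hwp⟩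
    have hwws : w ∈ ws := (mem_remW.mp hwr).1
    have hsing : (remW ws r).filter (fun w => prefS r w == k) = [w] := by
      apply eq_singleton_of_unique
        (List.mem_filter.mpr ⟨hwr, by simp [hwp]⟩) ?_ ((nodup_remW hnd r).filter _)
      intro u hu
      rcases List.mem_filter.mp hu with ⟨hur, hup⟩
      simp only [beq_iff_eq] at hup
      by_contra hune
      have hlcp : r ≤ lcpB u.toList w.toList := by
        rw [← prefS_eq_iff hune r]
        rw [hup, hwp]
      have := lcp_le_mlcp (ws := ws) (v := u) (w := w)
        ((mem_remW.mp hur).1) hune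
      rw [lcpB_comm] at hlcp
      omega
    constructor
    · rw [mem_keys_iff_of_inv ⟨h1, h2, h3⟩, hsing]
      simp
    · rw [h2 k, hsing]
      rfl

theorem two_le_length_of_two_mem {l : List String} {x y : String} (hx : x ∈ l)
    (hy : y ∈ l) (hne : x ≠ y) : 2 ≤ l.length := by
  rcases l with _ | ⟨a, _ | ⟨b, t⟩⟩
  · simp at hx
  · simp only [List.mem_singleton] at hx hy
    exact absurd (hx.trans hy.symm) hne
  · simp

theorem mem_remW_succ_of_mem {ws : List String} {w : String} {r : Nat}
    (h : w ∈ remW ws (r+1)) : w ∈ remW ws r := by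
  rw [mem_remW] at h ⊢
  exact ⟨h.1, by omega⟩

-- every survivor of round r sits in a group of size ≥ 2 at round r
theorem group_two_le {ws : List String} (hnd : ws.Nodup) {w : String} {r : Nat} (hr : 1 ≤ r)
    (h : w ∈ remW ws (r+1)) :
    2 ≤ ((remW ws r).filter (fun u => prefS r u == prefS r w)).length := by
  have hwr : w ∈ remW ws r := mem_remW_succ_of_mem h
  have hwws : w ∈ ws := (mem_remW.mp h).1
  have hmlcp : r ≤ mlcp ws w := by have := (mem_remW.mp h).2; omega
  rcases (mlcp_ge_iff w hr).mp hmlcp with ⟨v, hvws, hvne, hlcp⟩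
  have hvr : v ∈ remW ws r := by
    rw [mem_remW]
    have := lcp_le_mlcp (ws := ws) (v := w) (w := v) hwws (Ne.symm hvne)
    rw [lcpB_comm] at this
    exact ⟨hvws, by omega⟩
  have hvpref : prefS r v = prefS r w := by
    rw [prefS_eq_iff hvne r, lcpB_comm]
    exact hlcp
  exact two_le_length_of_two_mem
    (List.mem_filter.mpr ⟨hvr, by simp [hvpref]⟩)
    (List.mem_filter.mpr ⟨hwr, by simp⟩) hvne

theorem tailSum_split (ws : List String) (r : Nat) :
    tailSum ws r =
      (((remW ws r).filter (fun w => decide (mlcp ws w + 1 = r))).map (cwF ws)).sum +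
        tailSum ws (r+1) := by
  unfold tailSum
  have hperm : ((remW ws r).filter (fun w => decide (mlcp ws w + 1 = r)) ++
      (remW ws r).filter (fun w => !decide (mlcp ws w + 1 = r))).Perm (remW ws r) :=
    List.filter_append_perm _ _
  have hsum := (hperm.map (cwF ws)).sum_eq
  rw [List.map_append, List.sum_append] at hsum
  rw [← hsum]
  congr 2
  rw [remW_succ]
  congr 1
  apply List.filter_congr
  intro w hw
  have := (mem_remW.mp hw).2
  by_cases h : mlcp ws w + 1 = r <;> simp [h] <;> omega

theorem loop_lemma (ws : List String) (hnd : ws.Nodup) :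
    ∀ (fuel r : Nat) (d : PySem.Dict String (List String)) (ans : Int), 1 ≤ r →
    InvA ws r d → (∀ w ∈ ws, mlcp ws w + 1 < r + fuel) →
    solLoop fuel d ans = ans + tailSum ws r
  | 0, r, d, ans, hr, hinv, hfuel => by
    have hrem : remW ws r = [] := by
      rw [remW, List.filter_eq_nil_iff]
      intro w hw
      have := hfuel w hw
      simp only [decide_eq_true_eq]
      omega
    rw [solLoop, tailSum, hrem]
    simp
  | fuel+1, r, d, ans, hr, hinv, hfuel => by
    obtain ⟨h1, h2, h3⟩ := hinv
    rw [solLoop]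
    have hitems : d.items = d.keys.map (fun k => (k, d.getD k [])) :=
      PySem.Dict.items_eq_map_keys d h1 []
    rw [hitems, kd_foldl]
    rw [map_pair_filter_fst _ _ _ trivial, map_pair_filter_fst _ _ _ trivial]
    simp only [List.nil_append, erase_sum_foldl]
    simp only [show (fun (x : String) => x) = id from rfl, List.map_id]
    set Ks := d.keys.filter (fun k => decide ((d.getD k []).length ≠ 1)) with hKs
    set Ds := d.keys.filter (fun k => !decide ((d.getD k []).length ≠ 1)) with hDs
    have hDmem : ∀ k, k ∈ Ds ↔ ∃ w ∈ remW ws r, mlcp ws w + 1 = r ∧ prefS r w = k := by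
      intro k
      rw [← deletes_char hnd hr ⟨h1, h2, h3⟩ k, hDs, List.mem_filter]
      simp
    have hDnd : Ds.Nodup := h1.filter _
    set E := ((remW ws r).filter (fun w => decide (mlcp ws w + 1 = r))).map (prefS r) with hE
    have hEmem : ∀ k, k ∈ E ↔ ∃ w ∈ remW ws r, mlcp ws w + 1 = r ∧ prefS r w = k := by
      intro k
      rw [hE]
      simp only [List.mem_map, List.mem_filter, decide_eq_true_eq]
      constructor
      · rintro ⟨w, ⟨hw1, hw2⟩, hw3⟩
        exact ⟨w, hw1, hw2, hw3⟩
      · rintro ⟨w, hw1, hw2, hw3⟩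
        exact ⟨w, ⟨hw1, hw2⟩, hw3⟩
    have hEnd : E.Nodup := by
      rw [hE]
      apply (List.nodup_map_iff_inj_on ((nodup_remW hnd r).filter _)).mpr
      intro u hu v hv he
      rcases List.mem_filter.mp hu with ⟨hur, huc⟩
      rcases List.mem_filter.mp hv with ⟨hvr, hvc⟩
      simp only [decide_eq_true_eq] at huc hvc
      by_contra hne'
      have hlcp : r ≤ lcpB u.toList v.toList := (prefS_eq_iff hne' r).mp he
      have := lcp_le_mlcp (ws := ws) (v := v) (w := u) ((mem_remW.mp hvr).1) (Ne.symm hne')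
      omega
    have hperm : Ds.Perm E :=
      (List.perm_ext_iff_of_nodup hDnd hEnd).mpr (fun k => by rw [hDmem, hEmem])
    have hsumDs : (Ds.map PySem.Str.len).sum =
        (((remW ws r).filter (fun w => decide (mlcp ws w + 1 = r))).map (cwF ws)).sum := by
      rw [(hperm.map PySem.Str.len).sum_eq, hE, List.map_map]
      apply congrArg
      apply List.map_congr_left
      intro w hw
      rcases List.mem_filter.mp hw with ⟨hwr, hwc⟩
      simp only [decide_eq_true_eq] at hwc
      show PySem.Str.len (prefS r w) = cwF ws w
      rw [len_prefS, cwF, PySem.Str.len_eq]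
      rw [show ((mlcp ws w : Int) + 1) = ((mlcp ws w + 1 : Nat) : Int) from by push_cast; ring,
        hwc]
      push_cast
      rw [min_comm]
    by_cases hz : Ks.length = 0
    · rw [if_pos hz]
      have hKsnil : Ks = [] := List.length_eq_zero_iff.mp hz
      have hrem1 : remW ws (r+1) = [] := by
        by_contra hne'
        rcases List.exists_mem_of_ne_nil _ hne' with ⟨w, hw⟩
        have h2le := group_two_le hnd hr hw
        have hkey : prefS r w ∈ Ks := by
          rw [hKs, List.mem_filter]
          refine ⟨?_, ?_⟩
          · rw [mem_keys_iff_of_inv ⟨h1, h2, h3⟩]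
            intro hnil
            rw [hnil] at h2le
            simp at h2le
          · rw [h2]
            simp only [decide_eq_true_eq]
            omega
        rw [hKsnil] at hkey
        exact absurd hkey List.not_mem_nil
      rw [tailSum_split ws r, tailSum, hrem1, hsumDs]
      simp [add_assoc]
    · rw [if_neg hz]
      have hKmul : ∀ k ∈ Ks, 2 ≤ ((remW ws r).filter (fun w => prefS r w == k)).length := by
        intro k hk
        rw [hKs, List.mem_filter] at hk
        have hne' := h3 k hk.1
        rw [h2 k] at hne'
        have hlen1 : ((remW ws r).filter (fun w => prefS r w == k)).length ≠ 1 := by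
          have := hk.2
          simp only [decide_eq_true_eq] at this
          rw [h2 k] at this
          exact this
        have hpos : 0 < ((remW ws r).filter (fun w => prefS r w == k)).length :=
          List.length_pos_of_ne_nil hne'
        omega
      have hR1K : ∀ w ∈ remW ws (r+1), prefS r w ∈ Ks := by
        intro w hw
        have h2le := group_two_le hnd hr hw
        rw [hKs, List.mem_filter]
        refine ⟨?_, ?_⟩
        · rw [mem_keys_iff_of_inv ⟨h1, h2, h3⟩]
          intro hnil
          rw [hnil] at h2le
          simp at h2le
        · rw [h2]
          simp only [decide_eq_true_eq]
          omega
      have hDisj : ∀ k, k ∈ Ks → k ∉ Ds := by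
        intro k hk hd'
        rw [hKs, List.mem_filter] at hk
        rw [hDs, List.mem_filter] at hd'
        have ha := hk.2
        have hb := hd'.2
        rw [ha] at hb
        exact absurd hb (by simp)
      have hD1 : ∀ k', (Ds.foldl (fun d k => d.erase k) d).getD k' [] =
          (if k' ∈ Ks then (remW ws r).filter (fun w => prefS r w == k')
           else (remW ws (r+1)).filter
             (fun w => decide (prefS r w ∉ Ks) && (prefS (r+1) w == k'))) := by
        intro k'
        rw [getD_foldl_erase]
        by_cases hk' : k' ∈ Ks
        · rw [if_pos hk', if_neg (fun h => hDisj k' hk' h), h2]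
        · rw [if_neg hk']
          have htgt : (remW ws (r+1)).filter
              (fun w => decide (prefS r w ∉ Ks) && (prefS (r+1) w == k')) = [] := by
            rw [List.filter_eq_nil_iff]
            intro w hw hc
            simp only [Bool.and_eq_true, decide_eq_true_eq] at hc
            exact hc.1 (hR1K w hw)
          rw [htgt]
          by_cases hkd : k' ∈ Ds
          · rw [if_pos hkd]
          · rw [if_neg hkd, h2]
            rw [List.filter_eq_nil_iff]
            intro w hw hc
            have hkk : k' ∈ d.keys := by
              rw [mem_keys_iff_of_inv ⟨h1, h2, h3⟩]
              intro hnil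
              have hwmem : w ∈ (remW ws r).filter (fun w => prefS r w == k') :=
                List.mem_filter.mpr ⟨hw, hc⟩
              rw [hnil] at hwmem
              exact absurd hwmem List.not_mem_nil
            have : k' ∈ Ks ∨ k' ∈ Ds := by
              rw [hKs, hDs, List.mem_filter, List.mem_filter]
              by_cases hlen : (d.getD k' []).length ≠ 1 <;> simp [hkk, hlen]
            tauto
      have hD1nd : (Ds.foldl (fun d k => d.erase k) d).keys.Nodup := by
        rw [keys_foldl_erase]
        exact h1.filter _
      have hD1ne : ∀ k ∈ (Ds.foldl (fun d k => d.erase k) d).keys,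
          (Ds.foldl (fun d k => d.erase k) d).getD k [] ≠ [] := by
        intro k hk
        rw [keys_foldl_erase] at hk
        rcases List.mem_filter.mp hk with ⟨hk1, hk2⟩
        rw [getD_foldl_erase, if_neg (by simpa using hk2)]
        exact h3 k hk1
      obtain ⟨hg2, hg1, hg3⟩ := redist_fold ws hnd r hr Ks
        (Ds.foldl (fun d k => d.erase k) d) (h1.filter _) hKmul hD1 hD1nd hD1ne
      have hrec := loop_lemma ws hnd fuel (r+1)
        (Ks.foldl aRedistribute (Ds.foldl (fun d k => d.erase k) d))
        (ans + (Ds.map PySem.Str.len).sum) (by omega) ⟨hg1, hg2, hg3⟩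
        (fun w hw => by have := hfuel w hw; omega)
      rw [hrec, hsumDs, tailSum_split ws r]
      ring

theorem fold_len_acc (ws : List String) : ∀ n : Nat,
    ws.foldl (fun n w => n + (PySem.Str.len w).toNat) n =
      n + (ws.map (fun w => w.toList.length)).sum := by
  induction ws with
  | nil => intro n; simp
  | cons x xs ih =>
    intro n
    rw [List.foldl_cons, ih, List.map_cons, List.sum_cons]
    have : (PySem.Str.len x).toNat = x.toList.length := by
      rw [PySem.Str.len_eq]
      exact Int.toNat_natCast _
    omega

theorem foldl_max_le_iff (l : List Nat) (a b : Nat) :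
    l.foldl max a ≤ b ↔ a ≤ b ∧ ∀ x ∈ l, x ≤ b := by
  induction l generalizing a with
  | nil => simp
  | cons x xs ih =>
    simp only [List.foldl_cons, ih, List.mem_cons]
    constructor
    · rintro ⟨h1, h2⟩
      exact ⟨le_trans (le_max_left _ _) h1,
        fun y hy => hy.elim (fun e => e ▸ le_trans (le_max_right _ _) h1) (h2 y)⟩
    · rintro ⟨h1, h2⟩
      exact ⟨max_le h1 (h2 x (Or.inl rfl)), fun y hy => h2 y (Or.inr hy)⟩

theorem mlcp_le_len (ws : List String) (w : String) : mlcp ws w ≤ w.toList.length := by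
  rw [mlcp, foldl_max_le_iff]
  refine ⟨Nat.zero_le _, ?_⟩
  intro x hx
  rcases List.mem_map.mp hx with ⟨v, _, rfl⟩
  exact lcpB_le_left _ _

theorem solution_closed (ws : List String) (hnd : ws.Nodup) (hne : ∀ w ∈ ws, w ≠ "") :
    solution ws = (ws.map (cwF ws)).sum := by
  unfold solution
  rw [loop_lemma ws hnd _ 1 _ 0 (le_refl 1) (init_inv ws hnd hne) ?hfuel]
  · rw [tailSum, remW_one, zero_add]
  case hfuel =>
    intro w hw
    rw [fold_len_acc]
    have h1 : mlcp ws w ≤ w.toList.length := mlcp_le_len ws w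
    have h2 : w.toList.length ≤ (ws.map (fun w => w.toList.length)).sum :=
      List.le_sum_of_mem (List.mem_map_of_mem hw)
    omega

theorem solution_eq_alt (ws : List String) (hnd : ws.Nodup) (hne : ∀ w ∈ ws, w ≠ "") :
    solution ws = solution_alt ws := by
  rw [solution_closed ws hnd hne, alt_eq_sum ws hnd]

-- ===== VERDICT (by name: the statement is the Claim_ definition above) =====
theorem solution_spec : Claim_equal_solution := by
  unfold Claim_equal_solution Spec_solution
  intro words _ hpre
  exact solution_eq_alt words hpre.1 hpre.2
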